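-- pv_equiv track=rewrite | github.com/piyushmoolchandani/Lab_codes | cryptography_and_network_security/lab_assignment_1/4.py | inverse_pairs
-- ===== SOURCE A (Python) =====
-- def gcd(a, b):
--     if (b == 0):
--         return a;
--     else:
--         return gcd(b, a % b);
--
-- def inverse_pairs(n):
--     inverses = {}
--
--     additive = set();
--     for i in range(n):
--         for j in range(i, n):
--             if (not (i + j) % n):
--                 additive.add((i, j));
--
--     multiplicative = set();
--     for i in range(1, n):
--         if gcd(n, i) == 1:
--             for j in range(i, n):
--                 if ((i * j) % n == 1):
--                     multiplicative.add((i, j));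
--
--     inverses['additive_inverses'] = additive;
--     inverses['multiplicative_inverses'] = multiplicative;
--
--     return inverses;
-- ===== SOURCE B (Python) =====
-- def ext_gcd(a, b):
--     # returns (g, x, y) with a*x + b*y == g and g == gcd chain value
--     if b == 0:
--         return (a, 1, 0)
--     g, x, y = ext_gcd(b, a % b)
--     return (g, y, x - (a // b) * y)
--
-- def inverse_pairs(n):
--     additive = set()
--     multiplicative = set()
--     if n > 0:
--         additive.add((0, 0))
--         for i in range(1, n // 2 + 1):
--             additive.add((i, n - i))
--         for i in range(1, n):
--             g, x, _ = ext_gcd(i, n)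
--             if g == 1:
--                 j = x % n
--                 if j >= i:
--                     multiplicative.add((i, j))
--     return {'additive_inverses': additive, 'multiplicative_inverses': multiplicative}
-- ===== Notes on version B (the rewrite author's own statement) =====
-- stated objective: faster
-- what changed: Replaces both brute-force inner scans with closed forms: the additive inverse of i is directly n-i (loop only to n//2), and the multiplicative inverse is computed by extended Euclid instead of scanning all j and separately testing gcd.
import Mathlib
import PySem

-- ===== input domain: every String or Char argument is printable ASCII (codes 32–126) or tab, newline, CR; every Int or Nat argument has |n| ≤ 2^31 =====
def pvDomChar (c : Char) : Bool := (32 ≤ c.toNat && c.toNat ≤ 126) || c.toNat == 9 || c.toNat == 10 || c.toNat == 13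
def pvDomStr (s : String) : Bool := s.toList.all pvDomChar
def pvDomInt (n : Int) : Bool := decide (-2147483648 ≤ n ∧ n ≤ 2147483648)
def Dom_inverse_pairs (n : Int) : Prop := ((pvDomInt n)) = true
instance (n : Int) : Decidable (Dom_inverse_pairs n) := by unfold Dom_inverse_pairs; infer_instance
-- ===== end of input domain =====

-- B replaces both brute-force inner scans by closed forms (additive inverse n-i directly;
-- multiplicative inverse by extended Euclid), an asymptotically faster algorithm.

-- ===== PORT A =====
-- helper gcd of Source A (Python recursion, Python '%')
def pygcd (a b : Int) : Int :=
  if _h : b = 0 then a else pygcd b (PySem.Int.mod a b)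
termination_by b.natAbs
decreasing_by
  rcases lt_or_gt_of_ne _h with hb | hb
  · have h1 := PySem.Int.mod_neg_bounds a hb
    omega
  · have h1 := PySem.Int.mod_nonneg a hb
    have h2 := PySem.Int.mod_lt a hb
    omega

def inverse_pairs (n : Int) : List (String × List (Int × Int)) :=
  let additive : PySem.Set (Int × Int) :=
    (PySem.List.pyRange 0 n 1).foldl (fun s i =>
      (PySem.List.pyRange i n 1).foldl (fun s j =>
        if PySem.Int.mod (i + j) n == 0 then PySem.Set.add s (i, j) else s) s)
      PySem.Set.empty
  let multiplicative : PySem.Set (Int × Int) :=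
    (PySem.List.pyRange 1 n 1).foldl (fun s i =>
      if pygcd n i == 1 then
        (PySem.List.pyRange i n 1).foldl (fun s j =>
          if PySem.Int.mod (i * j) n == 1 then PySem.Set.add s (i, j) else s) s
      else s)
      PySem.Set.empty
  (((PySem.Dict.empty : PySem.Dict String (List (Int × Int))).insert "additive_inverses" additive).insert
    "multiplicative_inverses" multiplicative).items

-- ===== PORT B =====
-- helper ext_gcd of Source B: (g, x, y) with a*x + b*y = g
def extGcd (a b : Int) : Int × Int × Int :=
  if _h : b = 0 then (a, 1, 0)
  else
    let r := extGcd b (PySem.Int.mod a b)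
    (r.1, r.2.2, r.2.1 - PySem.Int.floordiv a b * r.2.2)
termination_by b.natAbs
decreasing_by
  rcases lt_or_gt_of_ne _h with hb | hb
  · have h1 := PySem.Int.mod_neg_bounds a hb
    omega
  · have h1 := PySem.Int.mod_nonneg a hb
    have h2 := PySem.Int.mod_lt a hb
    omega

def inverse_pairs_alt (n : Int) : List (String × List (Int × Int)) :=
  if 0 < n then
    let additive : PySem.Set (Int × Int) :=
      (PySem.List.pyRange 1 (PySem.Int.floordiv n 2 + 1) 1).foldl
        (fun s i => PySem.Set.add s (i, n - i))
        (PySem.Set.add PySem.Set.empty (0, 0))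
    let multiplicative : PySem.Set (Int × Int) :=
      (PySem.List.pyRange 1 n 1).foldl (fun s i =>
        let r := extGcd i n
        if r.1 == 1 then
          let j := PySem.Int.mod r.2.1 n
          if i ≤ j then PySem.Set.add s (i, j) else s
        else s)
        PySem.Set.empty
    [("additive_inverses", additive), ("multiplicative_inverses", multiplicative)]
  else
    [("additive_inverses", PySem.Set.empty), ("multiplicative_inverses", PySem.Set.empty)]

-- ===== PRECONDITION & SPEC =====
def Spec_inverse_pairs (n : Int) (out : List (String × List (Int × Int))) : Prop := out = inverse_pairs_alt n
instance (n : Int) (out : List (String × List (Int × Int))) : Decidable (Spec_inverse_pairs n out) := by unfold Spec_inverse_pairs; infer_instance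

-- ===== CLAIM (what is proved, stated in full; the proofs are below) =====
def Claim_equal_inverse_pairs : Prop := ∀ (n : Int), Dom_inverse_pairs n → Spec_inverse_pairs n (inverse_pairs n)

-- ===== LEMMAS AND PROOFS =====

-- a guarded loop whose body never fires leaves the accumulator unchanged
theorem foldl_if_none {β : Type} (p : Int → Prop) [DecidablePred p] (g : β → Int → β) (a b : Int)
    (hp : ∀ j, a ≤ j → j < b → ¬ p j) (s : β) :
    (PySem.List.pyRange a b 1).foldl (fun s j => if p j then g s j else s) s = s := by
  have h1 := PySem.List.foldl_congr_mem (PySem.List.pyRange a b 1)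
    (fun s j => if p j then g s j else s) (fun s _ => s) s
    (fun acc x hx => by
      rw [PySem.List.mem_pyRange_one] at hx
      exact if_neg (hp x hx.1 hx.2))
  rw [h1]
  clear h1 hp
  generalize PySem.List.pyRange a b 1 = l
  induction l generalizing s with
  | nil => rfl
  | cons x xs ih => exact ih (s := s)

-- a guarded loop whose body fires exactly at j0 performs exactly that one step
theorem foldl_if_single {β : Type} (p : Int → Prop) [DecidablePred p] (g : β → Int → β) (a b j0 : Int)
    (h0 : a ≤ j0) (h1 : j0 < b)
    (hp : ∀ j, a ≤ j → j < b → (p j ↔ j = j0)) (s : β) :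
    (PySem.List.pyRange a b 1).foldl (fun s j => if p j then g s j else s) s = g s j0 := by
  rw [PySem.List.pyRange_one_append a j0 b h0 (le_of_lt h1), List.foldl_append,
      foldl_if_none p g a j0 (fun j hj1 hj2 => fun hpj => by
        have := (hp j hj1 (lt_trans hj2 h1)).mp hpj; omega) s,
      PySem.List.pyRange_one_cons h1, List.foldl_cons,
      if_pos ((hp j0 h0 h1).mpr rfl)]
  exact foldl_if_none p g (j0 + 1) b (fun j hj1 hj2 => fun hpj => by
    have := (hp j (by omega) hj2).mp hpj; omega) (g s j0)

-- a multiple of n strictly between -n and n is 0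
theorem dvd_small (n d : Int) (h1 : -n < d) (h2 : d < n) : (n ∣ d) ↔ d = 0 := by
  constructor
  · intro h
    exact Int.eq_zero_of_abs_lt_dvd h (by rw [abs_lt]; exact ⟨h1, h2⟩)
  · rintro rfl; exact dvd_zero n

-- Bézout invariant of Source B's ext_gcd, and its gcd value agrees with Source A's gcd
theorem extGcd_spec (b a : Int) :
    a * (extGcd a b).2.1 + b * (extGcd a b).2.2 = (extGcd a b).1 ∧ (extGcd a b).1 = pygcd a b := by
  by_cases hb : b = 0
  · rw [extGcd, pygcd]
    simp [hb]
  · obtain ⟨ih1, ih2⟩ := extGcd_spec (PySem.Int.mod a b) b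
    rw [extGcd, pygcd]
    simp only [hb, dite_false]
    constructor
    · have hdm := PySem.Int.floordiv_mul_add_mod a b
      set r := extGcd b (PySem.Int.mod a b)
      linear_combination ih1 - r.2.2 * hdm
    · exact ih2
termination_by b.natAbs
decreasing_by
  rcases lt_or_gt_of_ne hb with hb' | hb'
  · have h1 := PySem.Int.mod_neg_bounds a hb'
    omega
  · have h1 := PySem.Int.mod_nonneg a hb'
    have h2 := PySem.Int.mod_lt a hb'
    omega

theorem pygcd_comm_lt (i n : Int) (h0 : 0 ≤ i) (h1 : i < n) : pygcd i n = pygcd n i := by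
  rw [pygcd]
  have hn : ¬ (n = 0) := by omega
  simp only [hn, dite_false]
  congr 1
  rw [PySem.Int.mod_eq_emod_of_pos (show (0:Int) < n by omega)]
  exact Int.emod_eq_of_lt h0 h1

-- A's inner additive scan at i = 0: only j = 0 fires
theorem innerAdd0 (n : Int) (hn : 0 < n) (s : PySem.Set (Int × Int)) :
    (PySem.List.pyRange 0 n 1).foldl (fun s j =>
        if PySem.Int.mod (0 + j) n == 0 then PySem.Set.add s ((0:Int), j) else s) s
      = PySem.Set.add s (0, 0) := by
  exact foldl_if_single _ _ 0 n 0 le_rfl hn (fun j hj1 hj2 => by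
    rw [beq_iff_eq, PySem.Int.mod_eq_zero_iff_dvd, zero_add,
        dvd_small n j (by omega) hj2]) s

-- A's inner additive scan at i ≥ 1 in closed form
theorem innerAddPos (n i : Int) (h1 : 1 ≤ i) (_h2 : i < n) (s : PySem.Set (Int × Int)) :
    (PySem.List.pyRange i n 1).foldl (fun s j =>
        if PySem.Int.mod (i + j) n == 0 then PySem.Set.add s (i, j) else s) s
      = if 2 * i ≤ n then PySem.Set.add s (i, n - i) else s := by
  have hshift : ∀ j : Int, (n ∣ (i + j)) ↔ n ∣ (i + j - n) :=
    fun j => ⟨fun h => dvd_sub h (dvd_refl n), fun h => by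
      have h3 : i + j = (i + j - n) + n := by ring
      rw [h3]; exact dvd_add h (dvd_refl n)⟩
  by_cases h2i : 2 * i ≤ n
  · rw [if_pos h2i]
    exact foldl_if_single _ _ i n (n - i) (by omega) (by omega) (fun j hj1 hj2 => by
      rw [beq_iff_eq, PySem.Int.mod_eq_zero_iff_dvd, hshift j,
          dvd_small n (i + j - n) (by omega) (by omega)]
      omega) s
  · rw [if_neg h2i]
    exact foldl_if_none _ _ i n (fun j hj1 hj2 hpj => by
      rw [beq_iff_eq, PySem.Int.mod_eq_zero_iff_dvd, hshift j,
          dvd_small n (i + j - n) (by omega) (by omega)] at hpj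
      omega) s

-- A's additive loop equals B's additive loop
theorem additive_eq (n : Int) (hn : 0 < n) :
    (PySem.List.pyRange 0 n 1).foldl (fun s i =>
        (PySem.List.pyRange i n 1).foldl (fun s j =>
          if PySem.Int.mod (i + j) n == 0 then PySem.Set.add s (i, j) else s) s)
      PySem.Set.empty
    = (PySem.List.pyRange 1 (PySem.Int.floordiv n 2 + 1) 1).foldl
        (fun s i => PySem.Set.add s (i, n - i))
        (PySem.Set.add PySem.Set.empty (0, 0)) := by
  have hq := PySem.Int.floordiv_mul_add_mod n 2
  have hr0 := PySem.Int.mod_nonneg n (by norm_num : (0:Int) < 2)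
  have hr1 := PySem.Int.mod_lt n (by norm_num : (0:Int) < 2)
  rw [PySem.List.pyRange_one_cons hn, List.foldl_cons]
  rw [innerAdd0 n hn PySem.Set.empty, show ((0:Int) + 1) = 1 by norm_num]
  rw [PySem.List.foldl_congr_mem (PySem.List.pyRange 1 n 1) _
      (fun s i => if 2 * i ≤ n then PySem.Set.add s (i, n - i) else s)
      (PySem.Set.add PySem.Set.empty (0, 0))
      (fun acc i hi => by
        rw [PySem.List.mem_pyRange_one] at hi
        exact innerAddPos n i hi.1 hi.2 acc)]
  rw [PySem.List.pyRange_one_append 1 (PySem.Int.floordiv n 2 + 1) n (by omega) (by omega),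
      List.foldl_append]
  rw [PySem.List.foldl_congr_mem (PySem.List.pyRange 1 (PySem.Int.floordiv n 2 + 1) 1) _
      (fun s i => PySem.Set.add s (i, n - i))
      (PySem.Set.add PySem.Set.empty (0, 0))
      (fun acc i hi => by
        rw [PySem.List.mem_pyRange_one] at hi
        exact if_pos (by omega))]
  exact foldl_if_none (fun i => 2 * i ≤ n) (fun s i => PySem.Set.add s (i, n - i))
    (PySem.Int.floordiv n 2 + 1) n (fun i hi1 hi2 h2i => by omega) _

-- one step of A's multiplicative loop equals one step of B's
theorem stepMul_eq (n i : Int) (hi : 1 ≤ i) (h2 : i < n) (s : PySem.Set (Int × Int)) :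
    (if pygcd n i == 1 then
        (PySem.List.pyRange i n 1).foldl (fun s j =>
          if PySem.Int.mod (i * j) n == 1 then PySem.Set.add s (i, j) else s) s
      else s)
    = (let r := extGcd i n
       if r.1 == 1 then
         let j := PySem.Int.mod r.2.1 n
         if i ≤ j then PySem.Set.add s (i, j) else s
       else s) := by
  obtain ⟨hbez, hgv⟩ := extGcd_spec n i
  have hcomm := pygcd_comm_lt i n (by omega) h2
  show (if pygcd n i == 1 then
        (PySem.List.pyRange i n 1).foldl (fun s j =>
          if PySem.Int.mod (i * j) n == 1 then PySem.Set.add s (i, j) else s) s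
      else s)
    = (if (extGcd i n).1 == 1 then
        (if i ≤ PySem.Int.mod (extGcd i n).2.1 n then
          PySem.Set.add s (i, PySem.Int.mod (extGcd i n).2.1 n) else s)
      else s)
  by_cases hg1 : pygcd n i = 1
  · have hgA : (pygcd n i == 1) = true := by simp [hg1]
    have hg1' : (extGcd i n).1 = 1 := by rw [hgv, hcomm]; exact hg1
    have hgE : ((extGcd i n).1 == 1) = true := by simp [hg1']
    rw [if_pos hgA, if_pos hgE]
    have hbez1 : i * (extGcd i n).2.1 + n * (extGcd i n).2.2 = 1 := by
      rw [hbez, hg1']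
    have hmodx : PySem.Int.mod (extGcd i n).2.1 n = (extGcd i n).2.1 % n :=
      PySem.Int.mod_eq_emod_of_pos (show (0:Int) < n by omega)
    have hj0a : 0 ≤ (extGcd i n).2.1 % n := Int.emod_nonneg _ (by omega)
    have hj0b : (extGcd i n).2.1 % n < n := Int.emod_lt_of_pos _ (by omega)
    have h1n : (1:Int) % n = 1 := Int.emod_eq_of_lt (by norm_num) (by omega)
    have hinv : (i * ((extGcd i n).2.1 % n)) % n = 1 := by
      have ha : (i * ((extGcd i n).2.1 % n)) % n = (i * (extGcd i n).2.1) % n := by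
        rw [Int.mul_emod i ((extGcd i n).2.1 % n) n, Int.emod_emod_of_dvd _ dvd_rfl,
            ← Int.mul_emod]
      rw [ha, show i * (extGcd i n).2.1 = 1 + n * (-(extGcd i n).2.2) by
            linear_combination hbez1,
          Int.add_mul_emod_self_left, h1n]
    have huniq : ∀ j, 0 ≤ j → j < n → (i * j) % n = 1 → j = (extGcd i n).2.1 % n := by
      intro j hja hjb hj
      have d1 : n ∣ (i * j - 1) :=
        Int.dvd_of_emod_eq_zero (by rw [Int.sub_emod, hj, h1n]; norm_num)
      have d2 : n ∣ (i * ((extGcd i n).2.1 % n) - 1) :=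
        Int.dvd_of_emod_eq_zero (by rw [Int.sub_emod, hinv, h1n]; norm_num)
      have d3 : n ∣ ((extGcd i n).2.1 % n - j) := by
        have e : (extGcd i n).2.1 % n - j =
            j * (i * ((extGcd i n).2.1 % n) - 1) - ((extGcd i n).2.1 % n) * (i * j - 1) := by
          ring
        rw [e]
        exact dvd_sub (d2.mul_left _) (d1.mul_left _)
      have := (dvd_small n ((extGcd i n).2.1 % n - j) (by omega) (by omega)).mp d3
      omega
    rw [hmodx]
    by_cases hij : i ≤ (extGcd i n).2.1 % n
    · rw [if_pos hij]
      exact foldl_if_single _ _ i n ((extGcd i n).2.1 % n) hij hj0b (fun j hj1 hj2 => by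
        constructor
        · intro hpj
          rw [beq_iff_eq,
              PySem.Int.mod_eq_emod_of_pos (show (0:Int) < n by omega)] at hpj
          exact huniq j (by omega) hj2 hpj
        · rintro rfl
          rw [beq_iff_eq,
              PySem.Int.mod_eq_emod_of_pos (show (0:Int) < n by omega)]
          exact hinv) s
    · rw [if_neg hij]
      exact foldl_if_none _ _ i n (fun j hj1 hj2 hpj => by
        rw [beq_iff_eq,
            PySem.Int.mod_eq_emod_of_pos (show (0:Int) < n by omega)] at hpj
        have := huniq j (by omega) hj2 hpj
        omega) s
  · have hgA : ¬ ((pygcd n i == 1) = true) := by simp [hg1]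
    have hgE : ¬ (((extGcd i n).1 == 1) = true) := by
      rw [hgv, hcomm]; simp [hg1]
    rw [if_neg hgA, if_neg hgE]

-- A's multiplicative loop equals B's multiplicative loop
theorem multiplicative_eq (n : Int) (_hn : 0 < n) :
    (PySem.List.pyRange 1 n 1).foldl (fun s i =>
        if pygcd n i == 1 then
          (PySem.List.pyRange i n 1).foldl (fun s j =>
            if PySem.Int.mod (i * j) n == 1 then PySem.Set.add s (i, j) else s) s
        else s)
      PySem.Set.empty
    = (PySem.List.pyRange 1 n 1).foldl (fun s i =>
        let r := extGcd i n
        if r.1 == 1 then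
          let j := PySem.Int.mod r.2.1 n
          if i ≤ j then PySem.Set.add s (i, j) else s
        else s)
      PySem.Set.empty := by
  refine PySem.List.foldl_congr_mem _ _ _ _ ?_
  intro acc i hi
  rw [PySem.List.mem_pyRange_one] at hi
  exact stepMul_eq n i hi.1 hi.2 acc

-- ===== VERDICT (by name: the statement is the Claim_ definition above) =====
theorem inverse_pairs_spec : Claim_equal_inverse_pairs := by
  intro n _
  unfold Spec_inverse_pairs
  by_cases hn : 0 < n
  · simp only [inverse_pairs, inverse_pairs_alt, if_pos hn]
    rw [additive_eq n hn, multiplicative_eq n hn]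
    rfl
  · simp only [inverse_pairs, inverse_pairs_alt, if_neg hn,
      PySem.List.pyRange_one_eq_nil (show n ≤ 0 by omega),
      PySem.List.pyRange_one_eq_nil (show n ≤ 1 by omega)]
    rfl
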